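-- pv_equiv track=rewrite | github.com/KuroBayashi/School-University | Python/License 3/Graphe/src/Project/Marriage/backtracking.py | marryUs
-- ===== SOURCE A (Python) =====
-- def marryUs(M):
--     ListeCouples = []   # Liste qui contiendra toutes les combinaisons possibles
--                         # Une combinaison etant de la forme [0, 1, 3, 4, 5, 2], signifie que :
--                         #   homme 1 est avec femme 1
--                         #   homme 2 est avec femme 3
--                         #   homme 3 est avec femme 4
--                         #   ...
--
--     def recursive(M, i, Couples, ListeCouples):
--         if i == len(M):
--             ListeCouples.append(Couples[:])
--         else:
--             for f in M[i]:
--                 if f not in Couples: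
--                     Couples[i] = f
--                     recursive(M, i+1, Couples, ListeCouples)
--                     Couples[i] = 0
--
--     recursive(M, 1, [0] * len(M), ListeCouples)
--
--     return ListeCouples
-- ===== SOURCE B (Python) =====
-- def marryUs(M):
--     # Iterative level-by-level build: extend each partial matching with every
--     # admissible woman from the next man's list (no reuse, no 0).
--     combos = [[0]]
--     for row in M[1:]:
--         combos = [c + [f] for c in combos for f in row if f != 0 and f not in c]
--     return combos
-- ===== Notes on version B (the rewrite author's own statement) =====
-- stated objective: alternative
-- what changed: Replaces the mutating DFS backtracking recursion by an iterative level-order fold that extends every partial matching with each admissible woman of the next row; Pre_ excludes the empty list, on which A raises IndexError.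
import Mathlib
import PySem

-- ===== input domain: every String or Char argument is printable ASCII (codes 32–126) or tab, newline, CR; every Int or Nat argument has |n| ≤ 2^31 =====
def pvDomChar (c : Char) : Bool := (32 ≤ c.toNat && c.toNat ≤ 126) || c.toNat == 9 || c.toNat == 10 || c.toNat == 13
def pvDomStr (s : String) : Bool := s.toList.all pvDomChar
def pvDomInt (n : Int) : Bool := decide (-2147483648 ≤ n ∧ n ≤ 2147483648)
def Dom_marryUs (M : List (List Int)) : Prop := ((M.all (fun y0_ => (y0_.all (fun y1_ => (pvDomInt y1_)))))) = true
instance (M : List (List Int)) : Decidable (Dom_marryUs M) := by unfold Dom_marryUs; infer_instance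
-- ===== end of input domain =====

-- B replaces A's mutating DFS backtracking recursion by an iterative level-order fold
-- over the rows (objective: alternative). Pre_ excludes the empty list, on which A raises IndexError.


-- ===== PORT A =====
-- `recursive(M, i, Couples, ListeCouples)`: the mutation of `Couples` is modelled by
-- threading it through the state pair (Couples, ListeCouples); fuel k (= remaining depth + 1)
-- only makes the recursion structural, it is never exhausted when k ≥ len(M)+1-i.
-- `M[i]` is read as `M.getD i []`: inside the recursion 1 ≤ i < len(M) always holds
-- (the i = len(M) branch returns first), except for the empty M excluded by Pre_.
def marryUsGo (k : Nat) (M : List (List Int)) (i : Nat) (st : List Int × List (List Int)) :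
    List Int × List (List Int) :=
  match k with
  | 0 => st
  | k + 1 =>
    if i = M.length then (st.1, st.2 ++ [st.1])
    else
      (M.getD i []).foldl
        (fun st f =>
          if f ∈ st.1 then st
          else
            let res := marryUsGo k M (i + 1) (st.1.set i f, st.2)
            (res.1.set i 0, res.2))
        st

def marryUs (M : List (List Int)) : List (List Int) :=
  (marryUsGo (M.length + 1) M 1 (List.replicate M.length 0, [])).2

-- ===== PORT B =====
-- one level of Source B's comprehension: [c + [f] for c in combos for f in row if f != 0 and f not in c]
def marryUsStep (combos : List (List Int)) (row : List Int) : List (List Int) :=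
  combos.flatMap (fun c =>
    row.filterMap (fun f => if f ≠ 0 ∧ f ∉ c then some (c ++ [f]) else none))

def marryUs_alt (M : List (List Int)) : List (List Int) :=
  (M.drop 1).foldl marryUsStep [[0]]   -- M[1:] with literal nonneg bound = drop 1 (exact)

-- ===== PRECONDITION & SPEC =====
-- Pre_ excludes only the empty list, on which A raises IndexError (`for f in M[1]`).
def Pre_marryUs (M : List (List Int)) : Prop := M ≠ []
instance (M : List (List Int)) : Decidable (Pre_marryUs M) := by unfold Pre_marryUs; infer_instance
def pvWitness_marryUs : List (List Int) := [[0], [1, 2], [1, 2]]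
def Spec_marryUs (M : List (List Int)) (out : List (List Int)) : Prop := out = marryUs_alt M
instance (M : List (List Int)) (out : List (List Int)) : Decidable (Spec_marryUs M out) := by unfold Spec_marryUs; infer_instance

-- ===== CLAIM (what is proved, stated in full; the proofs are below) =====
def Claim_equal_marryUs : Prop := ∀ (M : List (List Int)), Dom_marryUs M → Pre_marryUs M → Spec_marryUs M (marryUs M)

-- ===== LEMMAS AND PROOFS =====

-- one partial matching extended by one row (B's step applied to a single c)
def marryUsKept (c : List Int) (row : List Int) : List (List Int) :=
  row.filterMap (fun f => if f ≠ 0 ∧ f ∉ c then some (c ++ [f]) else none)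

theorem marryUsStep_singleton (c : List Int) (row : List Int) :
    marryUsStep [c] row = marryUsKept c row := by
  simp [marryUsStep, marryUsKept]

theorem marryUsStep_append (xs ys : List (List Int)) (row : List Int) :
    marryUsStep (xs ++ ys) row = marryUsStep xs row ++ marryUsStep ys row := by
  simp [marryUsStep]

theorem foldl_marryUsStep_flatMap (rest : List (List Int)) (cs : List (List Int)) :
    rest.foldl marryUsStep cs = cs.flatMap (fun c => rest.foldl marryUsStep [c]) := by
  induction rest generalizing cs with
  | nil => simp
  | cons r rest ih =>
    simp only [List.foldl_cons]
    rw [ih]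
    have h : ∀ c, rest.foldl marryUsStep (marryUsStep [c] r)
        = (marryUsStep [c] r).flatMap (fun c' => rest.foldl marryUsStep [c']) := fun c => ih _
    rw [show marryUsStep cs r = cs.flatMap (fun c => marryUsStep [c] r) by
      induction cs with
      | nil => simp [marryUsStep]
      | cons c cs ihc =>
        have := marryUsStep_append [c] cs r
        simp [ihc] at this ⊢; simp [this]]
    rw [List.flatMap_assoc]
    exact List.flatMap_congr (fun c _ => (h c).symm)

-- membership in the padded Couples list equals membership in the prefix c (0 ∈ c absorbs the padding)
theorem mem_padded (c : List Int) (m : Nat) (f : Int) (h0 : (0:Int) ∈ c) :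
    (f ∈ c ++ List.replicate m (0:Int)) ↔ f ∈ c := by
  simp only [List.mem_append, List.mem_replicate]
  constructor
  · rintro (h | ⟨-, rfl⟩) <;> [exact h; exact h0]
  · exact Or.inl

theorem set_padded (c : List Int) (m : Nat) (f : Int) (hm : 0 < m) :
    (c ++ List.replicate m (0:Int)).set c.length f
      = (c ++ [f]) ++ List.replicate (m - 1) (0:Int) := by
  obtain ⟨m, rfl⟩ : ∃ m', m = m' + 1 := ⟨m - 1, by omega⟩
  simp [List.replicate_succ]

-- main invariant: at depth i with partial matching c (of length i, containing 0),
-- the A-side recursion appends exactly B's fold continued from [c] over the remaining rows.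
theorem marryUsGo_eq (k : Nat) (M : List (List Int)) (i : Nat) (c : List Int)
    (acc : List (List Int)) (hi : i ≤ M.length) (hc : c.length = i)
    (h0 : (0:Int) ∈ c) (hk : M.length + 1 - i ≤ k) :
    marryUsGo k M i (c ++ List.replicate (M.length - i) 0, acc)
      = (c ++ List.replicate (M.length - i) 0,
         acc ++ (M.drop i).foldl marryUsStep [c]) := by
  induction k generalizing i c acc with
  | zero => omega
  | succ k ih =>
    by_cases hlen : i = M.length
    · subst hlen
      simp [marryUsGo]
    · have hilt : i < M.length := by omega
      have hdrop : M.drop i = M.getD i [] :: M.drop (i + 1) := by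
        rw [List.getD_eq_getElem?_getD, List.getElem?_eq_getElem hilt]
        simpa using (List.drop_eq_getElem_cons hilt)
      rw [marryUsGo]
      simp only [hlen, if_false]
      rw [hdrop, List.foldl_cons, marryUsStep_singleton,
        foldl_marryUsStep_flatMap _ (marryUsKept c (M.getD i []))]
      -- inner loop over the row, by induction on the row generalizing acc
      have inner : ∀ (row : List Int) (acc : List (List Int)),
          row.foldl
            (fun st f =>
              if f ∈ st.1 then st
              else
                let res := marryUsGo k M (i + 1) (st.1.set i f, st.2)
                (res.1.set i 0, res.2))
            (c ++ List.replicate (M.length - i) 0, acc)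
          = (c ++ List.replicate (M.length - i) 0,
             acc ++ (marryUsKept c row).flatMap
               (fun c' => (M.drop (i + 1)).foldl marryUsStep [c'])) := by
        intro row
        induction row with
        | nil => intro acc; simp [marryUsKept]
        | cons f fs ihr =>
          intro acc
          by_cases hf : f ∈ c
          · have hmem : f ∈ c ++ List.replicate (M.length - i) (0:Int) :=
              (mem_padded c _ f h0).mpr hf
            have hcond : ¬ (f ≠ 0 ∧ f ∉ c) := by tauto
            simp only [List.foldl_cons, hmem, if_true]
            rw [ihr acc]
            simp [marryUsKept, hcond]
          · have hf0 : f ≠ 0 := fun h => hf (h ▸ h0)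
            have hmem : f ∉ c ++ List.replicate (M.length - i) (0:Int) :=
              fun h => hf ((mem_padded c _ f h0).mp h)
            have hcond : (f ≠ 0 ∧ f ∉ c) := ⟨hf0, hf⟩
            simp only [List.foldl_cons, hmem, if_false]
            have hset : (c ++ List.replicate (M.length - i) (0:Int)).set i f
                = (c ++ [f]) ++ List.replicate (M.length - (i + 1)) (0:Int) := by
              rw [← hc, set_padded c _ f (by omega)]
              congr 2
            have hrec := ih (i + 1) (c ++ [f]) acc (by omega)
              (by simp [hc]) (by simp [h0]) (by omega)
            simp only [hset]
            rw [hrec]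
            have hset0 : ((c ++ [f]) ++ List.replicate (M.length - (i + 1)) (0:Int)).set i 0
                = c ++ List.replicate (M.length - i) (0:Int) := by
              subst hc
              rw [show M.length - c.length = (M.length - (c.length + 1)) + 1 by omega]
              simp [List.replicate_succ]
            simp only [hset0]
            rw [ihr]
            simp [marryUsKept, hcond, List.flatMap_cons, List.append_assoc]
      exact inner (M.getD i []) acc

theorem marryUs_spec : Claim_equal_marryUs := by
  intro M _ hpre
  unfold Spec_marryUs marryUs marryUs_alt
  have hlen : 1 ≤ M.length := by
    cases M with
    | nil => exact absurd rfl hpre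
    | cons _ _ => simp
  have hrep : List.replicate M.length (0:Int)
      = [0] ++ List.replicate (M.length - 1) 0 := by
    rw [show M.length = (M.length - 1) + 1 by omega]
    simp [List.replicate_succ]
  rw [hrep, marryUsGo_eq (M.length + 1) M 1 [0] [] hlen rfl (by simp) (by omega)]
  simp
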